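-- pv_equiv track=rewrite | github.com/mdrozhzhin/education | laboratory_3.py | find_divisible_elements
-- ===== SOURCE A (Python) =====
-- def find_divisible_elements(matrix):
--     num_columns = len(matrix[0])
--     result = []
--     for j in range(num_columns):
--         column_elements = [row[j] for row in matrix]
--         divisible_elements = [element for element in column_elements if is_divisible(element, j+1)]
--         if divisible_elements:
--             result.append((j+1, divisible_elements))
--     return result
--
-- def is_divisible(number, divisor):
--     divisors = [i for i in range(1, number+1) if number % i == 0]
--     return any(divisor % i == 0 for i in divisors)
-- ===== SOURCE B (Python) =====
-- def find_divisible_elements(matrix):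
--     n = len(matrix[0])
--     buckets = [[] for _ in range(n)]
--     for row in matrix:
--         buckets = [b + [x] if x >= 1 else b for b, x in zip(buckets, row)]
--     return [(j + 1, b) for j, b in enumerate(buckets) if b]
-- ===== Notes on version B (the rewrite author's own statement) =====
-- stated objective: faster
-- what changed: Replaced the per-element divisor enumeration (is_divisible builds all divisors of each element) by the equivalent constant test element >= 1, and replaced the column-by-column extraction by a single row-major pass that appends each positive element to its column bucket.
import Mathlib
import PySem

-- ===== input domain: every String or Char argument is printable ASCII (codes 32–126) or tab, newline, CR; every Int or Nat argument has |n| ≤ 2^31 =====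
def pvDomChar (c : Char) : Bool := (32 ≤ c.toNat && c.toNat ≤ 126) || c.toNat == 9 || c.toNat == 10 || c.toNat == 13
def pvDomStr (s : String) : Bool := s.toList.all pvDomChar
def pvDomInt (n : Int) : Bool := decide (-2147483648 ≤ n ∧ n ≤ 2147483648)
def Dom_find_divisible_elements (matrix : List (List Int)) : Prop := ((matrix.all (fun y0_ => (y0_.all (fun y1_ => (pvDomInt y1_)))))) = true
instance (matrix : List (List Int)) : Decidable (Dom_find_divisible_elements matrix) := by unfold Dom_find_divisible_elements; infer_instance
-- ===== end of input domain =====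

-- B replaces A's divisor-enumeration test by the equivalent constant check `element >= 1`
-- and collects the columns in one row-major pass over the matrix (faster; asymptotic).

-- ===== PORT A =====
def is_divisible (number divisor : Int) : Bool :=
  let divisors := (PySem.List.pyRange 1 (number + 1) 1).filter (fun i => PySem.Int.mod number i == 0)
  divisors.any (fun i => PySem.Int.mod divisor i == 0)

def find_divisible_elements (matrix : List (List Int)) : List (Int × List Int) :=
  let num_columns : Int := ((PySem.List.pyGet? matrix 0).getD []).length
  (PySem.List.pyRange 0 num_columns 1).foldl
    (fun result j =>
      let column_elements := matrix.map (fun row => PySem.List.pyGetD row j 0)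
      let divisible_elements := column_elements.filter (fun e => is_divisible e (j + 1))
      if !divisible_elements.isEmpty then result ++ [(j + 1, divisible_elements)] else result)
    []

-- ===== PORT B =====
def find_divisible_elements_alt (matrix : List (List Int)) : List (Int × List Int) :=
  let n := ((PySem.List.pyGet? matrix 0).getD []).length
  let buckets : List (List Int) := (List.range n).map (fun _ => [])
  let buckets := matrix.foldl
    (fun bs row => (bs.zip row).map (fun p => if p.2 ≥ 1 then p.1 ++ [p.2] else p.1)) buckets
  (PySem.List.enumerate buckets).filterMap
    (fun p => if !p.2.isEmpty then some (p.1 + 1, p.2) else none)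

-- ===== PRECONDITION & SPEC =====
-- Python A indexes matrix[0] and row[j] for j < len(matrix[0]): it raises IndexError
-- exactly when the matrix is empty or some row is shorter than the first row.
def Pre_find_divisible_elements (matrix : List (List Int)) : Prop :=
  matrix ≠ [] ∧ ∀ row ∈ matrix, (matrix.headD []).length ≤ row.length
instance (matrix : List (List Int)) : Decidable (Pre_find_divisible_elements matrix) := by
  unfold Pre_find_divisible_elements; infer_instance
def pvWitness_find_divisible_elements : List (List Int) := [[1, -2], [6, 4]]
def Spec_find_divisible_elements (matrix : List (List Int)) (out : List (Int × List Int)) : Prop := out = find_divisible_elements_alt matrix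
instance (matrix : List (List Int)) (out : List (Int × List Int)) : Decidable (Spec_find_divisible_elements matrix out) := by unfold Spec_find_divisible_elements; infer_instance

-- ===== CLAIM (what is proved, stated in full; the proofs are below) =====
def Claim_equal_find_divisible_elements : Prop := ∀ (matrix : List (List Int)), Dom_find_divisible_elements matrix → Pre_find_divisible_elements matrix → Spec_find_divisible_elements matrix (find_divisible_elements matrix)

-- ===== LEMMAS AND PROOFS =====

-- A's is_divisible e d is True iff e ≥ 1, for any divisor d ≥ 1 (1 divides everything;
-- for e ≤ 0 the divisor list is empty).
lemma is_divisible_eq (e d : Int) (_hd : 1 ≤ d) : is_divisible e d = decide (1 ≤ e) := by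
  unfold is_divisible
  by_cases he : 1 ≤ e
  · rw [PySem.List.pyRange_one_cons (by omega)]
    simp [he]
  · rw [PySem.List.pyRange_one_eq_nil (by omega)]
    simp [he]

lemma map_filter_eq_filterMap {α β : Type} (p : α → Bool) (f : α → β) (l : List α) :
    (l.filter p).map f = l.filterMap (fun x => if p x then some (f x) else none) := by
  induction l with
  | nil => simp
  | cons x xs ih => by_cases h : p x <;> simp [h, ih]

lemma enumerate_append {α : Type} (xs ys : List α) (s : Int) :
    PySem.List.enumerate (xs ++ ys) s
      = PySem.List.enumerate xs s ++ PySem.List.enumerate ys (s + xs.length) := by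
  induction xs generalizing s with
  | nil => simp [PySem.List.enumerate_nil]
  | cons x xs ih =>
    simp [PySem.List.enumerate_cons, ih]
    ring_nf

lemma enumerate_map_range {α : Type} (f : Nat → α) (n : Nat) :
    PySem.List.enumerate ((List.range n).map f) 0
      = (List.range n).map (fun k : Nat => ((k : Int), f k)) := by
  induction n with
  | zero => simp [PySem.List.enumerate_nil]
  | succ n ih =>
    rw [List.range_succ]
    simp only [List.map_append, List.map_cons, List.map_nil]
    rw [enumerate_append, ih]
    simp [PySem.List.enumerate_cons, PySem.List.enumerate_nil]

lemma zip_map_range {α : Type} (g : Nat → α) (row : List Int) (n : Nat) (h : n ≤ row.length) :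
    ((List.range n).map g).zip row = (List.range n).map (fun j => (g j, row.getD j 0)) := by
  apply List.ext_getElem
  · simp [List.length_zip]; omega
  · intro i h1 h2
    have hi : i < n := by simpa using h2
    have hr : i < row.length := by omega
    simp [List.getElem_zip, List.getD_eq_getElem?_getD, List.getElem?_eq_getElem hr]

-- The row-major bucket fold computes, per column j, the filtered column.
lemma bucket_fold (rows : List (List Int)) : ∀ (n : Nat) (g : Nat → List Int),
    (∀ row ∈ rows, n ≤ row.length) →
    rows.foldl (fun bs row => (bs.zip row).map (fun p => if p.2 ≥ 1 then p.1 ++ [p.2] else p.1))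
        ((List.range n).map g)
      = (List.range n).map
          (fun j => g j ++ (rows.map (fun row => row.getD j 0)).filter (fun e => decide (1 ≤ e))) := by
  induction rows with
  | nil => intro n g _; simp
  | cons row rows ih =>
    intro n g hlen
    have hr : n ≤ row.length := hlen row (by simp)
    rw [List.foldl_cons, zip_map_range g row n hr, List.map_map]
    have step :
        ((fun p : List Int × Int => if p.2 ≥ 1 then p.1 ++ [p.2] else p.1) ∘
            fun j => (g j, row.getD j 0))
          = fun j => if row.getD j 0 ≥ 1 then g j ++ [row.getD j 0] else g j := by
      funext j; simp [Function.comp]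
    rw [step, ih n _ (fun r hr' => hlen r (by simp [hr']))]
    apply List.map_congr_left
    intro j _
    simp only [List.map_cons, List.filter_cons, ge_iff_le, decide_eq_true_eq]
    split_ifs with h <;> simp

-- ===== VERDICT (by name: the statement is the Claim_ definition above) =====
theorem find_divisible_elements_spec : Claim_equal_find_divisible_elements := by
  intro matrix _ hpre
  obtain ⟨hne, hrows⟩ := hpre
  unfold Spec_find_divisible_elements find_divisible_elements find_divisible_elements_alt
  simp only []
  set n : Nat := ((PySem.List.pyGet? matrix 0).getD []).length with hn
  have hlen : ∀ row ∈ matrix, n ≤ row.length := by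
    intro row hr
    have h := hrows row hr
    cases matrix with
    | nil => exact absurd rfl hne
    | cons a l => simpa [hn, PySem.List.pyGet?_zero_cons] using h
  -- B side: evaluate the bucket fold and the enumerate/filterMap
  rw [bucket_fold matrix n (fun _ => []) hlen]
  simp only [List.nil_append]
  rw [enumerate_map_range, List.filterMap_map]
  -- A side: the append-if loop is filter-then-map over the range
  rw [PySem.List.foldl_append_if, PySem.List.pyRange_zero_nat, List.filter_map, List.map_map,
      map_filter_eq_filterMap]
  apply List.filterMap_congr
  intro k hk
  have hcol : (matrix.map (fun row => PySem.List.pyGetD row ((k : Int)) 0)).filter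
        (fun e => is_divisible e ((k : Int) + 1))
      = (matrix.map (fun row => row.getD k 0)).filter (fun e => decide (1 ≤ e)) := by
    simp only [PySem.List.pyGetD_natCast]
    apply List.filter_congr
    intro e _
    exact is_divisible_eq e ((k : Int) + 1) (by omega)
  simp only [Function.comp_apply]
  simp only [PySem.List.pyGetD_natCast]
  simp only [PySem.List.pyGetD_natCast] at hcol
  rw [hcol]
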